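-- pv_equiv track=rewrite | github.com/gillimo/matrixscore-rating-engine-test-implement | team_cli_v6.py | _extract_type_filters
-- ===== SOURCE A (Python) =====
-- TYPE_POOL = [
--     "normal",
--     "fire",
--     "water",
--     "electric",
--     "grass",
--     "ice",
--     "fighting",
--     "poison",
--     "ground",
--     "flying",
--     "psychic",
--     "bug",
--     "rock",
--     "ghost",
--     "dragon",
--     "dark",
--     "steel",
--     "fairy",
-- ]
--
-- def _extract_type_filters(tokens):
--     type_filters = []
--     remaining = []
--     for tok in tokens:
--         low = tok.lower()
--         if low in TYPE_POOL and len(type_filters) < 2: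
--             type_filters.append(low)
--         else:
--             remaining.append(tok)
--     return remaining, type_filters
-- ===== SOURCE B (Python) =====
-- TYPE_POOL = [
--     "normal",
--     "fire",
--     "water",
--     "electric",
--     "grass",
--     "ice",
--     "fighting",
--     "poison",
--     "ground",
--     "flying",
--     "psychic",
--     "bug",
--     "rock",
--     "ghost",
--     "dragon",
--     "dark",
--     "steel",
--     "fairy",
-- ]
--
-- def _extract_type_filters(tokens):
--     # two-pass: pick the indices of the first two type tokens, then filter them out
--     first_two = [(i, tok) for i, tok in enumerate(tokens) if tok.lower() in TYPE_POOL][:2]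
--     chosen = [i for i, _ in first_two]
--     type_filters = [tok.lower() for _, tok in first_two]
--     remaining = [tok for i, tok in enumerate(tokens) if i not in chosen]
--     return remaining, type_filters
-- ===== Notes on version B (the rewrite author's own statement) =====
-- stated objective: alternative
-- what changed: Replaces A's single stateful pass with a counter-driven accumulator by a two-pass index-set shape: first collect the indices of the first two type tokens via enumerate+filter, then build type_filters from those entries and remaining by filtering out the chosen indices.
import Mathlib
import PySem

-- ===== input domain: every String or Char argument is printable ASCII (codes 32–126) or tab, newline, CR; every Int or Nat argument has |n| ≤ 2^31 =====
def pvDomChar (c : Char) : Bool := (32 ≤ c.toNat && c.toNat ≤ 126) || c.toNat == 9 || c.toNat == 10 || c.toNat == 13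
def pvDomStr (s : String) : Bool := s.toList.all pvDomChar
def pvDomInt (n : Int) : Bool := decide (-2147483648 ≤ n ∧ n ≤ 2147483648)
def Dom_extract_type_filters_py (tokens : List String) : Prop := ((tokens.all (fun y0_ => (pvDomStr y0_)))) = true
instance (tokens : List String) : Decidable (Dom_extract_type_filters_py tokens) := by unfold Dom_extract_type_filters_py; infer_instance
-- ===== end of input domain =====

-- B replaces A's stateful counter-driven single pass by a two-pass shape (pick the
-- indices of the first two type tokens, then filter them out); objective: alternative.

def TYPE_POOL : List String :=
  ["normal", "fire", "water", "electric", "grass", "ice", "fighting", "poison",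
   "ground", "flying", "psychic", "bug", "rock", "ghost", "dragon", "dark", "steel", "fairy"]

-- ===== PORT A =====
-- one loop step of A: append the lowered token to type_filters (< 2 so far) or the token to remaining
def pvStepA (st : List String × List String) (tok : String) : List String × List String :=
  let low := PySem.Str.lower tok
  if low ∈ TYPE_POOL ∧ st.1.length < 2 then (st.1 ++ [low], st.2) else (st.1, st.2 ++ [tok])

def extract_type_filters_py (tokens : List String) : List String × List String :=
  let st := tokens.foldl pvStepA ([], [])
  (st.2, st.1)

-- ===== PORT B =====
-- the first-two type-token entries of enumerate(tokens, s), i.e. [(i, tok) …][:k]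
def pvFirst (tokens : List String) (s : Int) (k : Nat) : List (Int × String) :=
  ((PySem.List.enumerate tokens s).filter (fun p => decide (PySem.Str.lower p.2 ∈ TYPE_POOL))).take k

def extract_type_filters_py_alt (tokens : List String) : List String × List String :=
  let firstTwo := pvFirst tokens 0 2
  let chosen := firstTwo.map Prod.fst
  let typeFilters := firstTwo.map (fun p => PySem.Str.lower p.2)
  let remaining := ((PySem.List.enumerate tokens 0).filter (fun p => decide (p.1 ∉ chosen))).map Prod.snd
  (remaining, typeFilters)

-- ===== PRECONDITION & SPEC =====
def Spec_extract_type_filters_py (tokens : List String) (out : List String × List String) : Prop := out = extract_type_filters_py_alt tokens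
instance (tokens : List String) (out : List String × List String) : Decidable (Spec_extract_type_filters_py tokens out) := by unfold Spec_extract_type_filters_py; infer_instance

-- ===== CLAIM (what is proved, stated in full; the proofs are below) =====
def Claim_equal_extract_type_filters_py : Prop := ∀ (tokens : List String), Dom_extract_type_filters_py tokens → Spec_extract_type_filters_py tokens (extract_type_filters_py tokens)

-- ===== LEMMAS AND PROOFS =====

-- once type_filters has 2 entries, A's loop only appends to remaining
lemma pv_exhaust (ts : List String) : ∀ (tf rem : List String), 2 ≤ tf.length →
    ts.foldl pvStepA (tf, rem) = (tf, rem ++ ts) := by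
  induction ts with
  | nil => intro tf rem _; simp
  | cons t ts ih =>
    intro tf rem h
    have : pvStepA (tf, rem) t = (tf, rem ++ [t]) := by
      simp [pvStepA]; omega
    simp only [List.foldl_cons, this, ih _ _ h, List.append_assoc, List.singleton_append]

-- indices produced by enumerate(_, s) are ≥ s
lemma pv_fst_ge (ts : List String) (s : Int) (p : Int × String)
    (hp : p ∈ PySem.List.enumerate ts s) : s ≤ p.1 := by
  rcases (PySem.List.mem_enumerate_iff ts s p).1 hp with ⟨k, hk, rfl⟩
  simp

lemma pv_chosen_ge (ts : List String) (s : Int) (k : Nat) (i : Int)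
    (hi : i ∈ (pvFirst ts s k).map Prod.fst) : s ≤ i := by
  rcases List.mem_map.1 hi with ⟨p, hp, rfl⟩
  exact pv_fst_ge ts s p (List.mem_of_mem_filter (List.mem_of_mem_take hp))

-- loop invariant: A's fold from state (tf, rem) equals B's two-pass computation
-- with budget 2 - |tf|, over enumerate(_, s)
lemma pv_loop (ts : List String) : ∀ (s : Int) (tf rem : List String),
    ts.foldl pvStepA (tf, rem) =
      (tf ++ (pvFirst ts s (2 - tf.length)).map (fun p => PySem.Str.lower p.2),
       rem ++ ((PySem.List.enumerate ts s).filter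
                (fun p => decide (p.1 ∉ (pvFirst ts s (2 - tf.length)).map Prod.fst))).map Prod.snd) := by
  induction ts with
  | nil => intro s tf rem; simp [pvFirst, PySem.List.enumerate_nil]
  | cons t ts ih =>
    intro s tf rem
    by_cases h2 : tf.length < 2
    · by_cases hp : PySem.Str.lower t ∈ TYPE_POOL
      · -- type token consumed
        have hstep : pvStepA (tf, rem) t = (tf ++ [PySem.Str.lower t], rem) := by
          simp [pvStepA, hp, h2]
        have hfirst : pvFirst (t :: ts) s (2 - tf.length)
            = (s, t) :: pvFirst ts (s + 1) (2 - (tf.length + 1)) := by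
          have hk : 2 - tf.length = (2 - (tf.length + 1)) + 1 := by omega
          simp [pvFirst, PySem.List.enumerate_cons, hp, hk, List.take_succ_cons]
        have htail : ∀ p ∈ PySem.List.enumerate ts (s + 1),
            (decide (p.1 ∉ s :: (pvFirst ts (s + 1) (2 - (tf.length + 1))).map Prod.fst))
              = (decide (p.1 ∉ (pvFirst ts (s + 1) (2 - (tf.length + 1))).map Prod.fst)) := by
          intro p hpmem
          have := pv_fst_ge ts (s + 1) p hpmem
          simp only [decide_eq_decide, List.mem_cons]
          constructor
          · intro h hmem; exact h (Or.inr hmem)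
          · intro h hmem
            rcases hmem with h' | h'
            · omega
            · exact h h'
        rw [List.foldl_cons, hstep, ih (s + 1) (tf ++ [PySem.Str.lower t]) rem, hfirst]
        simp only [PySem.List.enumerate_cons, List.filter_cons, List.map_cons,
          List.length_append, List.length_cons, List.length_nil, Nat.zero_add]
        rw [if_neg (by simp)]
        refine Prod.ext (by simp) ?_
        exact congrArg (fun l => rem ++ l.map Prod.snd) (List.filter_congr htail).symm
      · -- not a type token
        have hstep : pvStepA (tf, rem) t = (tf, rem ++ [t]) := by
          simp [pvStepA, hp]
        have hfirst : pvFirst (t :: ts) s (2 - tf.length) = pvFirst ts (s + 1) (2 - tf.length) := by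
          simp [pvFirst, PySem.List.enumerate_cons, hp]
        have hhead : s ∉ (pvFirst ts (s + 1) (2 - tf.length)).map Prod.fst := by
          intro hmem
          have := pv_chosen_ge ts (s + 1) (2 - tf.length) s hmem
          omega
        rw [List.foldl_cons, hstep, ih (s + 1) tf (rem ++ [t]), hfirst]
        simp only [PySem.List.enumerate_cons, List.filter_cons, hhead, decide_true,
          not_false_eq_true]
        simp [List.append_assoc]
    · -- budget exhausted: everything goes to remaining
      have hk : 2 - tf.length = 0 := by omega
      rw [pv_exhaust (t :: ts) tf rem (by omega), hk]
      simp [pvFirst, PySem.List.map_snd_enumerate]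

-- ===== VERDICT (by name: the statement is the Claim_ definition above) =====
theorem extract_type_filters_py_spec : Claim_equal_extract_type_filters_py := by
  intro tokens _
  unfold Spec_extract_type_filters_py extract_type_filters_py extract_type_filters_py_alt
  rw [pv_loop tokens 0 [] []]
  simp
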